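-- pv_equiv track=rewrite | github.com/FlavioACampos/TSIA | functions.py | fuzzy_matrix_sum
-- ===== SOURCE A (Python) =====
-- def fuzzy_matrix_sum(fuzzy_matrix):
-- 	"""Funcion sumatoria de valores de una matriz difusa.
--
-- 	:fuzzy_matrix: matriz cuyas filas son valores difusos ([n, n, n])
-- 	:return: regresa la suma de todos los valores difusos de la matriz
-- 	"""
-- 	tri_sum = [0, 0, 0]
-- 	for fuzzy_row in fuzzy_matrix:
-- 		for fuzzy_val in fuzzy_row:
-- 			tri_sum[0] += fuzzy_val[0]
-- 			tri_sum[1] += fuzzy_val[1]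
-- 			tri_sum[2] += fuzzy_val[2]
-- 	return tri_sum
-- ===== SOURCE B (Python) =====
-- def fuzzy_matrix_sum(fuzzy_matrix):
--     flat = [fuzzy_val for fuzzy_row in fuzzy_matrix for fuzzy_val in fuzzy_row]
--     return [sum(v[0] for v in flat),
--             sum(v[1] for v in flat),
--             sum(v[2] for v in flat)]
-- ===== Notes on version B (the rewrite author's own statement) =====
-- stated objective: idiomatic
-- what changed: Replaces the single nested loop mutating a 3-slot accumulator with a flatten followed by three independent componentwise sum() passes.
import Mathlib
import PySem

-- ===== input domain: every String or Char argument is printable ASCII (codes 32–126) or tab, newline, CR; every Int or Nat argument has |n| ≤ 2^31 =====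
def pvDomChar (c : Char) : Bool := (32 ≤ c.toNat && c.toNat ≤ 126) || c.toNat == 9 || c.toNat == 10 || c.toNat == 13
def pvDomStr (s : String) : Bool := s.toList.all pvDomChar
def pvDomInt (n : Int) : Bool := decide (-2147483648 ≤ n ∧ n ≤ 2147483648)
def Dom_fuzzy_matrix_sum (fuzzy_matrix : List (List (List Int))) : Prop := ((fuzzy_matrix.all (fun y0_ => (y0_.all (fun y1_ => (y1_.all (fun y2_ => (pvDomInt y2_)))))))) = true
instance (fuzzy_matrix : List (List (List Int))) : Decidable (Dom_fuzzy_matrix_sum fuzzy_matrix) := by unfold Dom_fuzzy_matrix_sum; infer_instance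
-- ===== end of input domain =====

-- B replaces A's single nested loop mutating a 3-slot accumulator with a flatten
-- plus three independent componentwise sum passes (idiomatic decomposition).


-- ===== PORT A =====
-- tri_sum[i] += fuzzy_val[i] for i = 0,1,2; indexing via pyGet? (in range under Pre_)
def pvStepA (tri_sum : List Int) (fuzzy_val : List Int) : List Int :=
  [(PySem.List.pyGet? tri_sum 0).getD 0 + (PySem.List.pyGet? fuzzy_val 0).getD 0,
   (PySem.List.pyGet? tri_sum 1).getD 0 + (PySem.List.pyGet? fuzzy_val 1).getD 0,
   (PySem.List.pyGet? tri_sum 2).getD 0 + (PySem.List.pyGet? fuzzy_val 2).getD 0]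

def fuzzy_matrix_sum (fuzzy_matrix : List (List (List Int))) : List Int :=
  fuzzy_matrix.foldl (fun tri_sum fuzzy_row => fuzzy_row.foldl pvStepA tri_sum) [0, 0, 0]

-- ===== PORT B =====
-- sum(v[i] for v in flat), indexing via pyGet? (in range under Pre_)
def pvSumAt (i : Int) (flat : List (List Int)) : Int :=
  flat.foldl (fun s v => s + (PySem.List.pyGet? v i).getD 0) 0

def fuzzy_matrix_sum_alt (fuzzy_matrix : List (List (List Int))) : List Int :=
  let flat := fuzzy_matrix.flatMap (fun fuzzy_row => fuzzy_row)
  [pvSumAt 0 flat, pvSumAt 1 flat, pvSumAt 2 flat]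

-- ===== PRECONDITION & SPEC =====
-- Pre_ excludes matrices containing a fuzzy value shorter than 3, on which both A and B raise IndexError.
def Pre_fuzzy_matrix_sum (fuzzy_matrix : List (List (List Int))) : Prop :=
  ∀ row ∈ fuzzy_matrix, ∀ v ∈ row, 3 ≤ v.length
instance (fuzzy_matrix : List (List (List Int))) : Decidable (Pre_fuzzy_matrix_sum fuzzy_matrix) := by unfold Pre_fuzzy_matrix_sum; infer_instance
def pvWitness_fuzzy_matrix_sum : List (List (List Int)) := [[[1, 2, 3], [4, 5, 6]], [[7, 8, 9]]]

def Spec_fuzzy_matrix_sum (fuzzy_matrix : List (List (List Int))) (out : List Int) : Prop := out = fuzzy_matrix_sum_alt fuzzy_matrix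
instance (fuzzy_matrix : List (List (List Int))) (out : List Int) : Decidable (Spec_fuzzy_matrix_sum fuzzy_matrix out) := by unfold Spec_fuzzy_matrix_sum; infer_instance

-- ===== CLAIM (what is proved, stated in full; the proofs are below) =====
def Claim_equal_fuzzy_matrix_sum : Prop := ∀ (fuzzy_matrix : List (List (List Int))), Dom_fuzzy_matrix_sum fuzzy_matrix → Pre_fuzzy_matrix_sum fuzzy_matrix → Spec_fuzzy_matrix_sum fuzzy_matrix (fuzzy_matrix_sum fuzzy_matrix)

-- ===== LEMMAS AND PROOFS =====

-- shift the accumulator out of pvSumAt's fold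
theorem pvSumAt_shift (i : Int) (flat : List (List Int)) (s : Int) :
    flat.foldl (fun s v => s + (PySem.List.pyGet? v i).getD 0) s = s + pvSumAt i flat := by
  induction flat generalizing s with
  | nil => simp [pvSumAt]
  | cons v t ih =>
    simp only [List.foldl_cons, pvSumAt] at *
    rw [ih, ih (0 + (PySem.List.pyGet? v i).getD 0)]
    ring

-- the nested A-fold equals the fold over the flattened list
theorem foldA_flat (m : List (List (List Int))) (ts : List Int) :
    m.foldl (fun tri_sum fuzzy_row => fuzzy_row.foldl pvStepA tri_sum) ts
      = (m.flatMap (fun r => r)).foldl pvStepA ts := by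
  induction m generalizing ts with
  | nil => rfl
  | cons r t ih => simp [List.foldl_append, ih]

-- the A-fold over any flat list, started at a 3-slot accumulator, is componentwise sums
theorem foldA_components (flat : List (List Int)) (a b c : Int) :
    flat.foldl pvStepA [a, b, c] = [a + pvSumAt 0 flat, b + pvSumAt 1 flat, c + pvSumAt 2 flat] := by
  induction flat generalizing a b c with
  | nil => simp [pvSumAt]
  | cons v t ih =>
    simp only [List.foldl_cons]
    have hstep : pvStepA [a, b, c] v =
        [a + (PySem.List.pyGet? v 0).getD 0,
         b + (PySem.List.pyGet? v 1).getD 0,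
         c + (PySem.List.pyGet? v 2).getD 0] := by
      simp [pvStepA, PySem.List.pyGet?, PySem.List.pyIdx?]
    rw [hstep, ih]
    have h0 := pvSumAt_shift 0 t ((PySem.List.pyGet? v 0).getD 0)
    have h1 := pvSumAt_shift 1 t ((PySem.List.pyGet? v 1).getD 0)
    have h2 := pvSumAt_shift 2 t ((PySem.List.pyGet? v 2).getD 0)
    simp only [pvSumAt, List.foldl_cons, Int.zero_add] at *
    rw [h0, h1, h2]
    simp only [List.cons.injEq, and_true]
    refine ⟨by ring, by ring, by ring⟩

-- ===== VERDICT (by name: the statement is the Claim_ definition above) =====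
theorem fuzzy_matrix_sum_spec : Claim_equal_fuzzy_matrix_sum := by
  intro m _ _
  unfold Spec_fuzzy_matrix_sum fuzzy_matrix_sum fuzzy_matrix_sum_alt
  rw [foldA_flat, foldA_components]
  simp
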